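-- pv_equiv track=rewrite | github.com/saucissonn/speedrun | docs/exercices_python/sujet2-48-Copie.py | point_le_plus_proche
-- ===== SOURCE A (Python) =====
-- def distance_carre(point1, point2):
--     """ Calcule et renvoie la distance au carre entre
--     deux points."""
--     return (point1[0] - point2[0])**2 + (point1[1] - point2[1])**2
--
-- def point_le_plus_proche(depart, tab):
--     """ Renvoie les coordonnées du premier point du tableau tab se
--     trouvant à la plus courte distance du point depart."""
--     min_point = tab[0]
--     min_dist = distance_carre(tab[0], depart)
--     for i in range(1, len(tab)):
--         if distance_carre(tab[i], depart) < min_dist: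
--             min_point = tab[i]
--             min_dist = distance_carre(tab[i], depart)
--     return min_point
-- ===== SOURCE B (Python) =====
-- def point_le_plus_proche(depart, tab):
--     """Renvoie le premier point de tab a la plus courte distance de depart:
--     tri stable par distance au carre, puis premier element."""
--     return sorted(tab, key=lambda p: (p[0] - depart[0]) ** 2 + (p[1] - depart[1]) ** 2)[0]
-- ===== Notes on version B (the rewrite author's own statement) =====
-- stated objective: idiomatic
-- what changed: Replaces the hand-written min-tracking scan with a one-line stable sort by squared distance followed by taking the first element; stability preserves the first-wins tie-break.
-- outside the precondition, e.g. on point_le_plus_proche((0, 0), []): A raises IndexError, B raises IndexError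
import Mathlib
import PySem

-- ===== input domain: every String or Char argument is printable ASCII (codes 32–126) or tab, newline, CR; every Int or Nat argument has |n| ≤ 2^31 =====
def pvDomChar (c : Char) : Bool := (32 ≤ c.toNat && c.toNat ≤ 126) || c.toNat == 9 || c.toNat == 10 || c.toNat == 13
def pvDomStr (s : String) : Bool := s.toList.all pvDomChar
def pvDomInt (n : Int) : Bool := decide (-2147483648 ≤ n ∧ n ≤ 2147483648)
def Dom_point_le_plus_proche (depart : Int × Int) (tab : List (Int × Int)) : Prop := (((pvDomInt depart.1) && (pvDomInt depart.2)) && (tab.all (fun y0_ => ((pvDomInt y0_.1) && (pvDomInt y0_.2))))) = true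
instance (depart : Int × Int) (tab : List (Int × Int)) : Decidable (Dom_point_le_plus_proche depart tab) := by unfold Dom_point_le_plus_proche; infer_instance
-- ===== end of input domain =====

-- B replaces A's min-tracking index loop by a stable sort on squared distance plus
-- taking the first element (idiomatic one-liner); the return value is identical.

-- ===== PORT A =====
def distance_carre (point1 point2 : Int × Int) : Int :=
  (point1.1 - point2.1) ^ 2 + (point1.2 - point2.2) ^ 2

-- A's loop over range(1, len(tab)) reading tab[i] is ported as the structural fold
-- over the tail with the same (min_point, min_dist) state; [] (where tab[0] raises
-- IndexError) is excluded by Pre_ and returns a dummy.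
def point_le_plus_proche (depart : Int × Int) (tab : List (Int × Int)) : Int × Int :=
  match tab with
  | [] => (0, 0)
  | p0 :: rest =>
      (rest.foldl
        (fun s p => if distance_carre p depart < s.2 then (p, distance_carre p depart) else s)
        (p0, distance_carre p0 depart)).1

-- ===== PORT B =====
-- sorted(tab, key=…)[0]; [0] on the empty result (IndexError) is excluded by Pre_.
def point_le_plus_proche_alt (depart : Int × Int) (tab : List (Int × Int)) : Int × Int :=
  match PySem.List.sorted tab (fun p => (p.1 - depart.1) ^ 2 + (p.2 - depart.2) ^ 2) false with
  | [] => (0, 0)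
  | m :: _ => m

-- ===== PRECONDITION & SPEC =====
-- Pre_ excludes only the empty tab, on which both Pythons raise IndexError.
def Pre_point_le_plus_proche (depart : Int × Int) (tab : List (Int × Int)) : Prop := tab ≠ []
instance (depart : Int × Int) (tab : List (Int × Int)) : Decidable (Pre_point_le_plus_proche depart tab) := by unfold Pre_point_le_plus_proche; infer_instance
def pvWitness_point_le_plus_proche : (Int × Int) × (List (Int × Int)) := ((0, 0), [(1, 2), (0, 1)])

def Spec_point_le_plus_proche (depart : Int × Int) (tab : List (Int × Int)) (out : Int × Int) : Prop := out = point_le_plus_proche_alt depart tab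
instance (depart : Int × Int) (tab : List (Int × Int)) (out : Int × Int) : Decidable (Spec_point_le_plus_proche depart tab out) := by unfold Spec_point_le_plus_proche; infer_instance

-- ===== CLAIM (what is proved, stated in full; the proofs are below) =====
def Claim_equal_point_le_plus_proche : Prop := ∀ (depart : Int × Int) (tab : List (Int × Int)), Dom_point_le_plus_proche depart tab → Pre_point_le_plus_proche depart tab → Spec_point_le_plus_proche depart tab (point_le_plus_proche depart tab)

-- ===== LEMMAS AND PROOFS =====

-- head of insertBy with a strict-< comparator: the new head is x iff x beats the old head
theorem insertBy_head (key : (Int × Int) → Int) (x h : Int × Int) (t : List (Int × Int)) :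
    PySem.List.insertBy (fun a b => decide (key a < key b)) x (h :: t) =
      if key x < key h then x :: h :: t
      else h :: PySem.List.insertBy (fun a b => decide (key a < key b)) x t := by
  simp [PySem.List.insertBy]

-- invariant: after inserting the elements of l into a nonempty sorted accumulator,
-- the head equals A's running first-minimum over l started from the accumulator's head
theorem head_foldl_insertBy (key : (Int × Int) → Int) (l : List (Int × Int)) :
    ∀ (h : Int × Int) (t : List (Int × Int)),
      (l.foldl (fun acc x => PySem.List.insertBy (fun a b => decide (key a < key b)) x acc) (h :: t)).head? =
        some ((l.foldl (fun s p => if key p < s.2 then (p, key p) else s) (h, key h)).1) := by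
  induction l with
  | nil => intro h t; rfl
  | cons x l ih =>
      intro h t
      simp only [List.foldl_cons, insertBy_head]
      by_cases hx : key x < key h
      · simp [hx, ih]
      · simp [hx, ih]

-- ===== VERDICT (by name: the statement is the Claim_ definition above) =====
theorem point_le_plus_proche_spec : Claim_equal_point_le_plus_proche := by
  unfold Claim_equal_point_le_plus_proche
  intro depart tab _ hpre
  unfold Spec_point_le_plus_proche point_le_plus_proche point_le_plus_proche_alt
  match tab, hpre with
  | p0 :: rest, _ =>
    rw [PySem.List.sorted_eq_foldl_insertBy]
    have hhead := head_foldl_insertBy (fun p => (p.1 - depart.1) ^ 2 + (p.2 - depart.2) ^ 2) rest p0 []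
    simp only [List.foldl_cons]
    have hins : PySem.List.insertBy
        (fun a b => decide ((a.1 - depart.1) ^ 2 + (a.2 - depart.2) ^ 2 < (b.1 - depart.1) ^ 2 + (b.2 - depart.2) ^ 2))
        p0 ([] : List (Int × Int)) = [p0] := rfl
    rw [hins]
    have hdc : distance_carre = fun (point1 point2 : Int × Int) =>
        (point1.1 - point2.1) ^ 2 + (point1.2 - point2.2) ^ 2 := rfl
    cases hres : (rest.foldl (fun acc x =>
        PySem.List.insertBy (fun a b => decide ((a.1 - depart.1) ^ 2 + (a.2 - depart.2) ^ 2 < (b.1 - depart.1) ^ 2 + (b.2 - depart.2) ^ 2)) x acc) [p0]) with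
    | nil => rw [hres] at hhead; simp at hhead
    | cons m t =>
        rw [hres] at hhead
        simp only [List.head?_cons, Option.some.injEq] at hhead
        simp [hdc, ← hhead]
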